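-- pv_equiv track=rewrite | github.com/SHIBINSHA02/Planora | hillclimb.py | evaluate_cost
-- ===== SOURCE A (Python) =====
-- def evaluate_cost(timetable, teachers, days, periods):
--     cost = 0
--     teacher_load = {t: 0 for t in teachers}
--
--     for day in range(days):
--         teachers_in_day = set()
--         for period in range(periods):
--             teacher = timetable[day][period]
--             teacher_load[teacher] += 1
--
--             if teacher in teachers_in_day:
--                 cost += 1000
--             else:
--                 teachers_in_day.add(teacher)
--
--             if period == periods - 1:
--                 cost += 10
--
--     expected_load = (days * periods) // len(teachers)
--     for t in teachers:
--         if teacher_load[t] > expected_load + 2 or teacher_load[t] < expected_load - 2: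
--             cost += 500
--
--     return cost
-- ===== SOURCE B (Python) =====
-- def evaluate_cost(timetable, teachers, days, periods):
--     # materialise the visited grid once (keeps IndexError on short rows/tables)
--     rows = [[timetable[d][p] for p in range(periods)] for d in range(days)]
--     # the once-per-day +10 in closed form (paid only when a last period exists)
--     cost = 10 * len(rows) if periods > 0 else 0
--     # a day's conflicts = adjacent duplicates of its sorted cells
--     for row in rows:
--         srt = sorted(row)
--         cost += 1000 * sum(1 if x == y else 0 for x, y in zip(srt, srt[1:]))
--     # loads read off the flattened grid by occurrence counting (no dict at all)
--     flat = [t for row in rows for t in row]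
--     expected = (days * periods) // len(teachers)
--     for t in teachers:
--         if abs(flat.count(t) - expected) > 2:
--             cost += 500
--     return cost
-- ===== Notes on version B (the rewrite author's own statement) =====
-- stated objective: alternative
-- what changed: B drops A's incremental seen-set and dict of loads entirely: it materialises the visited grid once, pays the per-day +10 in closed form, counts a day's conflicts as adjacent duplicates of the day's sorted cells (sort-then-scan), and reads each teacher's load by counting occurrences in the flattened grid.
import Mathlib
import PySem

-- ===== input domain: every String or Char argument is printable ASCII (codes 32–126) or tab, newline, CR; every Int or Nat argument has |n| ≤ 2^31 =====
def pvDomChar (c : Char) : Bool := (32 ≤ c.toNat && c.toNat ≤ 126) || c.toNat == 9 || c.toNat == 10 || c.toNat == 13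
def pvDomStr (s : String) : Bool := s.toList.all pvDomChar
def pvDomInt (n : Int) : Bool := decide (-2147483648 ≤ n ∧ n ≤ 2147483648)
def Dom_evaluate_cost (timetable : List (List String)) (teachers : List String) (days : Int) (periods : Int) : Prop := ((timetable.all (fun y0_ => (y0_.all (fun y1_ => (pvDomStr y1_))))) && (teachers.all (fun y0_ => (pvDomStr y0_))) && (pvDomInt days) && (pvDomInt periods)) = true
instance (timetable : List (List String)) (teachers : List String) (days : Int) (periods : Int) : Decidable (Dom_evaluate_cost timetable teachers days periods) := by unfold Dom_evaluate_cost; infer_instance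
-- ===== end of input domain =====

-- B replaces A's seen-set/dict bookkeeping: per-day +10 in closed form, conflicts by
-- sorting a day's cells and counting adjacent duplicates, loads by counting occurrences
-- in the flattened grid (objective: alternative).

-- ===== PORT A =====
-- timetable[day][period] (the getD defaults are only reached outside Pre_, where Python raises IndexError)
def pvCell (timetable : List (List String)) (day period : Int) : String :=
  (PySem.List.pyGet? ((PySem.List.pyGet? timetable day).getD []) period).getD ""

-- teacher_load[teacher] += 1 (outside Pre_ Python raises KeyError; insert/getD is exact when the key is present)
def pvInc (d : PySem.Dict String Int) (t : String) : PySem.Dict String Int :=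
  d.insert t (d.getD t 0 + 1)

-- A's inner-loop body: load update, seen-set conflict test, +10 on the last period
def pvPeriodStep (timetable : List (List String)) (periods day : Int)
    (q : Int × PySem.Dict String Int × PySem.Set String) (period : Int) :
    Int × PySem.Dict String Int × PySem.Set String :=
  let teacher := pvCell timetable day period
  let d' := pvInc q.2.1 teacher
  let q1 : Int × PySem.Dict String Int × PySem.Set String :=
    if PySem.Set.contains q.2.2 teacher then (q.1 + 1000, d', q.2.2)
    else (q.1, d', PySem.Set.add q.2.2 teacher)
  if period = periods - 1 then (q1.1 + 10, q1.2.1, q1.2.2) else q1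

-- A's per-day loop: run the periods with a fresh seen set, keep (cost, load)
def pvDayStepA (timetable : List (List String)) (periods : Int)
    (s : Int × PySem.Dict String Int) (day : Int) : Int × PySem.Dict String Int :=
  let r := (PySem.List.pyRange 0 periods 1).foldl (pvPeriodStep timetable periods day)
             (s.1, s.2, PySem.Set.empty)
  (r.1, r.2.1)

def evaluate_cost (timetable : List (List String)) (teachers : List String) (days : Int) (periods : Int) : Int :=
  let load0 : PySem.Dict String Int := teachers.foldl (fun d t => d.insert t 0) PySem.Dict.empty
  let fin := (PySem.List.pyRange 0 days 1).foldl (pvDayStepA timetable periods) (0, load0)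
  let expected := PySem.Int.floordiv (days * periods) (teachers.length : Int)
  teachers.foldl
    (fun c t =>
      if fin.2.getD t 0 > expected + 2 ∨ fin.2.getD t 0 < expected - 2 then c + 500 else c)
    fin.1

-- ===== PORT B =====
def evaluate_cost_alt (timetable : List (List String)) (teachers : List String) (days : Int) (periods : Int) : Int :=
  -- rows = [[timetable[d][p] for p in range(periods)] for d in range(days)]
  let rows := (PySem.List.pyRange 0 days 1).map
      (fun d => (PySem.List.pyRange 0 periods 1).map (fun p => pvCell timetable d p))
  -- cost = 10 * len(rows) if periods > 0 else 0
  let cost0 : Int := if 0 < periods then 10 * (rows.length : Int) else 0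
  -- for row in rows: cost += 1000 * sum(1 if x == y else 0 for x, y in zip(srt, srt[1:]))
  let cost1 := rows.foldl
      (fun c row =>
        let srt := PySem.List.sorted row (fun x => x) false
        c + 1000 * (((srt.zip (PySem.List.slice srt (some 1) none)).map
            (fun p => if p.1 = p.2 then (1 : Int) else 0)).sum))
      cost0
  -- flat = [t for row in rows for t in row]
  let flat := rows.flatMap (fun row => row)
  let expected := PySem.Int.floordiv (days * periods) (teachers.length : Int)
  teachers.foldl
    (fun c t => if 2 < ((flat.count t : Int) - expected).natAbs then c + 500 else c)
    cost1

-- ===== PRECONDITION & SPEC =====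
-- Pre_ excludes exactly the inputs on which the Python A raises: empty teachers (ZeroDivisionError),
-- a visited day missing from the timetable or a visited period missing from its row (IndexError),
-- and a visited cell naming a teacher outside `teachers` (KeyError).
def Pre_evaluate_cost (timetable : List (List String)) (teachers : List String) (days : Int) (periods : Int) : Prop :=
  teachers ≠ [] ∧
  (0 < periods → days ≤ (timetable.length : Int) ∧
    ∀ row ∈ timetable.take days.toNat,
      periods ≤ (row.length : Int) ∧ ∀ c ∈ row.take periods.toNat, c ∈ teachers)

instance (timetable : List (List String)) (teachers : List String) (days : Int) (periods : Int) : Decidable (Pre_evaluate_cost timetable teachers days periods) := by unfold Pre_evaluate_cost; infer_instance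

def pvWitness_evaluate_cost : List (List String) × List String × Int × Int :=
  ([["a", "b"], ["b", "b"]], ["a", "b"], 2, 2)

def Spec_evaluate_cost (timetable : List (List String)) (teachers : List String) (days : Int) (periods : Int) (out : Int) : Prop := out = evaluate_cost_alt timetable teachers days periods
instance (timetable : List (List String)) (teachers : List String) (days : Int) (periods : Int) (out : Int) : Decidable (Spec_evaluate_cost timetable teachers days periods out) := by unfold Spec_evaluate_cost; infer_instance

-- ===== CLAIM (what is proved, stated in full; the proofs are below) =====
def Claim_equal_evaluate_cost : Prop := ∀ (timetable : List (List String)) (teachers : List String) (days : Int) (periods : Int), Dom_evaluate_cost timetable teachers days periods → Pre_evaluate_cost timetable teachers days periods → Spec_evaluate_cost timetable teachers days periods (evaluate_cost timetable teachers days periods)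

-- ===== LEMMAS AND PROOFS =====

-- the cells A visits on one day
def pvCells (timetable : List (List String)) (day periods : Int) : List String :=
  (PySem.List.pyRange 0 periods 1).map (fun p => pvCell timetable day p)

-- A's seen-set body (without the +10) on one cell
def pvSeenStep (q : Int × PySem.Dict String Int × PySem.Set String) (teacher : String) :
    Int × PySem.Dict String Int × PySem.Set String :=
  let d' := pvInc q.2.1 teacher
  if PySem.Set.contains q.2.2 teacher then (q.1 + 1000, d', q.2.2)
  else (q.1, d', PySem.Set.add q.2.2 teacher)

-- closed form of the seen-set fold: conflicts = length minus newly-inserted distinct elements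
lemma pv_seen_fold (l : List String) (c : Int) (d : PySem.Dict String Int) (s : PySem.Set String) :
    l.foldl pvSeenStep (c, d, s)
      = (c + 1000 * ((l.length : Int)
            - (((l.foldl PySem.Set.add s).length : Int) - (s.length : Int))),
         l.foldl pvInc d, l.foldl PySem.Set.add s) := by
  induction l generalizing c d s with
  | nil => simp
  | cons x xs ih =>
    rw [List.foldl_cons, List.foldl_cons (f := pvInc), List.foldl_cons (f := PySem.Set.add)]
    by_cases hx : x ∈ s
    · have h1 : pvSeenStep (c, d, s) x = (c + 1000, pvInc d x, s) := by
        simp [pvSeenStep, PySem.Set.contains_eq_listContains, hx]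
      rw [h1, ih, PySem.Set.add_of_mem hx]
      refine Prod.ext ?_ rfl
      simp only [List.length_cons]
      push_cast; ring
    · have h1 : pvSeenStep (c, d, s) x = (c, pvInc d x, PySem.Set.add s x) := by
        simp [pvSeenStep, PySem.Set.contains_eq_listContains, hx]
      rw [h1, ih, PySem.Set.add_of_not_mem hx]
      refine Prod.ext ?_ rfl
      simp only [List.length_cons, List.length_append, List.length_nil]
      push_cast; ring

-- with at least one period, A's inner loop is the seen-set fold over the day's cells plus one +10
lemma pv_inner_pos (tt : List (List String)) (day P : Int) (hP : 0 < P)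
    (init : Int × PySem.Dict String Int × PySem.Set String) :
    (PySem.List.pyRange 0 P 1).foldl (pvPeriodStep tt P day) init
      = (((pvCells tt day P).foldl pvSeenStep init).1 + 10,
         ((pvCells tt day P).foldl pvSeenStep init).2.1,
         ((pvCells tt day P).foldl pvSeenStep init).2.2) := by
  have hsplit : PySem.List.pyRange 0 P 1 = PySem.List.pyRange 0 (P - 1) 1 ++ [P - 1] := by
    have h1 := PySem.List.pyRange_one_append 0 (P - 1) P (by omega) (by omega)
    have h2 := PySem.List.pyRange_one_singleton (P - 1)
    rw [sub_add_cancel] at h2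
    rw [h1, h2]
  have hcells : pvCells tt day P
      = (PySem.List.pyRange 0 (P - 1) 1).map (fun p => pvCell tt day p) ++ [pvCell tt day (P - 1)] := by
    unfold pvCells; rw [hsplit, List.map_append]; rfl
  have hpre : (PySem.List.pyRange 0 (P - 1) 1).foldl (pvPeriodStep tt P day) init
      = ((PySem.List.pyRange 0 (P - 1) 1).map (fun p => pvCell tt day p)).foldl pvSeenStep init := by
    rw [List.foldl_map]
    apply PySem.List.foldl_congr_mem
    intro acc x hx
    have hb := (PySem.List.mem_pyRange_one).mp hx
    simp [pvPeriodStep, pvSeenStep, show ¬ (x = P - 1) by omega]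
  rw [hsplit, hcells, List.foldl_append, List.foldl_append, hpre]
  simp [pvPeriodStep, pvSeenStep]

-- number of distinct elements of a list, as PySem.Set or as a Finset
lemma pv_ofList_length (l : List String) :
    ((PySem.Set.ofList l).length : Int) = (l.toFinset.card : Int) := by
  have h1 : (PySem.Set.ofList l).toFinset = l.toFinset := by
    ext x
    simp [List.mem_toFinset, PySem.Set.mem_ofList]
  have h2 := List.toFinset_card_of_nodup (PySem.Set.nodup_ofList (xs := l))
  rw [← h2, h1]

-- adjacent duplicates of a ≤-sorted list count length minus distinct elements
lemma pv_adj_sorted (s : List String) (hs : s.Pairwise (· ≤ ·)) :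
    ((s.zip (s.drop 1)).map (fun p => if p.1 = p.2 then (1 : Int) else 0)).sum
      = (s.length : Int) - (s.toFinset.card : Int) := by
  induction s with
  | nil => simp
  | cons a t ih =>
    cases t with
    | nil => simp
    | cons b u =>
      have hrest : (b :: u).Pairwise (· ≤ ·) := hs.of_cons
      have hab : a ≤ b := (List.pairwise_cons.mp hs).1 b (by simp)
      have hstep := ih hrest
      simp only [List.drop_one, List.tail_cons] at hstep ⊢
      have hzip : (a :: b :: u).zip (b :: u) = (a, b) :: (b :: u).zip u := rfl
      rw [hzip, List.map_cons, List.sum_cons, hstep]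
      by_cases hab' : a = b
      · subst hab'
        have hmem : a ∈ (a :: u).toFinset := by simp
        rw [if_pos rfl]
        have : (a :: a :: u).toFinset = (a :: u).toFinset := by
          simp [List.toFinset_cons]
        rw [this]
        simp only [List.length_cons]
        push_cast; ring
      · have hnotmem : a ∉ (b :: u) := by
          intro hmem
          rcases List.mem_cons.mp hmem with h | h
          · exact hab' h
          · have hbu : b ≤ a := (List.pairwise_cons.mp hrest).1 a h
            exact hab' (le_antisymm hab hbu)
        rw [if_neg hab']
        have : (a :: b :: u).toFinset = insert a (b :: u).toFinset := by
          simp [List.toFinset_cons]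
        rw [this, Finset.card_insert_of_notMem (by simpa using hnotmem)]
        simp only [List.length_cons]
        push_cast; ring

-- B's per-row term = a day's conflict count (length minus distinct)
lemma pv_row_conflicts (l : List String) :
    (((PySem.List.sorted l (fun x => x) false).zip
        (PySem.List.slice (PySem.List.sorted l (fun x => x) false) (some 1) none)).map
        (fun p => if p.1 = p.2 then (1 : Int) else 0)).sum
      = (l.length : Int) - ((PySem.Set.ofList l).length : Int) := by
  set srt := PySem.List.sorted l (fun x => x) false with hsrt
  have hperm : srt.Perm l := PySem.List.sorted_perm l (fun x => x) false
  have hslice : PySem.List.slice srt (some 1) none = srt.drop 1 := by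
    have := PySem.List.slice_from_natCast (xs := srt) (a := 1)
    simpa using this
  have hpair : srt.Pairwise (· ≤ ·) := PySem.List.sorted_pairwise l (fun x => x)
  rw [hslice, pv_adj_sorted srt hpair, hperm.length_eq,
    List.toFinset_eq_of_perm srt l hperm, pv_ofList_length]

-- closed form of A's day loop when there is at least one period
lemma pv_outerA (tt : List (List String)) (P : Int) (hP : 0 < P) (L : List Int)
    (c : Int) (d : PySem.Dict String Int) :
    L.foldl (pvDayStepA tt P) (c, d)
      = (c + (L.map (fun day => 10 + 1000 * (((pvCells tt day P).length : Int)
            - ((PySem.Set.ofList (pvCells tt day P)).length : Int)))).sum,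
         (L.flatMap (fun day => pvCells tt day P)).foldl pvInc d) := by
  induction L generalizing c d with
  | nil => simp
  | cons day L ih =>
    rw [List.foldl_cons]
    have hA : pvDayStepA tt P (c, d) day
        = (c + 10 + 1000 * (((pvCells tt day P).length : Int)
              - ((PySem.Set.ofList (pvCells tt day P)).length : Int)),
           (pvCells tt day P).foldl pvInc d) := by
      unfold pvDayStepA
      rw [pv_inner_pos tt day P hP, pv_seen_fold]
      refine Prod.ext ?_ rfl
      simp only [PySem.Set.ofList_eq_foldl, PySem.Set.empty, List.length_nil]
      push_cast; ring
    rw [hA, ih, List.flatMap_cons, List.foldl_append, List.map_cons, List.sum_cons]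
    refine Prod.ext ?_ rfl
    simp only
    ring

-- a fold over the teachers with pointwise-equal steps
lemma pv_check_congr (ts : List String) (c : Int) (e : Int) (fA fB : String → Int)
    (h : ∀ t ∈ ts, fA t = fB t) :
    ts.foldl (fun c t => if fA t > e + 2 ∨ fA t < e - 2 then c + 500 else c) c
      = ts.foldl (fun c t => if 2 < (fB t - e).natAbs then c + 500 else c) c := by
  apply PySem.List.foldl_congr_mem
  intro acc t ht
  rw [h t ht]
  by_cases hc : 2 < (fB t - e).natAbs
  · rw [if_pos (by omega), if_pos hc]
  · rw [if_neg (by omega), if_neg hc]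

-- the zero-initialised load dict reads 0 everywhere
lemma pv_load0_getD (ts : List String) (t : String) (d : PySem.Dict String Int)
    (h : d.getD t 0 = 0) :
    (ts.foldl (fun d t => d.insert t 0) d).getD t 0 = 0 := by
  induction ts generalizing d with
  | nil => simpa using h
  | cons x ts ih =>
    rw [List.foldl_cons]
    apply ih
    by_cases hx : x = t
    · subst hx; simp [PySem.Dict.getD_insert_self]
    · rw [PySem.Dict.getD_insert]
      simp [Ne.symm hx, h]

-- after the pvInc fold, a load is the occurrence count in the consumed cells
lemma pv_load_count (l : List String) (d : PySem.Dict String Int) (t : String) :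
    (l.foldl pvInc d).getD t 0 = d.getD t 0 + (l.count t : Int) := by
  have := PySem.Dict.getD_foldl_insert_add_one (l := l) (d := d) (v := t)
  simpa [pvInc] using this

-- ===== VERDICT (by name: the statement is the Claim_ definition above) =====
theorem evaluate_cost_spec : Claim_equal_evaluate_cost := by
  intro tt ts days P _ _
  unfold Spec_evaluate_cost
  simp only [evaluate_cost, evaluate_cost_alt]
  set L := PySem.List.pyRange 0 days 1 with hL
  set load0 : PySem.Dict String Int := ts.foldl (fun d t => d.insert t 0) PySem.Dict.empty with hload0
  have hload0t : ∀ t, load0.getD t 0 = 0 := fun t =>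
    pv_load0_getD ts t PySem.Dict.empty (by simp)
  set rows := L.map (fun d => (PySem.List.pyRange 0 P 1).map (fun p => pvCell tt d p)) with hrows
  have hrowcells : rows = L.map (fun day => pvCells tt day P) := rfl
  have hflat : rows.flatMap (fun row => row) = L.flatMap (fun day => pvCells tt day P) := by
    rw [hrowcells, List.flatMap_map]
  by_cases hP : 0 < P
  · -- at least one period per day
    rw [pv_outerA tt P hP L 0 load0]
    have hcost1 : rows.foldl
        (fun c row =>
          c + 1000 * ((((PySem.List.sorted row (fun x => x) false).zip
              (PySem.List.slice (PySem.List.sorted row (fun x => x) false) (some 1) none)).map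
              (fun p => if p.1 = p.2 then (1 : Int) else 0)).sum))
        (if 0 < P then 10 * (rows.length : Int) else 0)
        = 0 + (L.map (fun day => 10 + 1000 * (((pvCells tt day P).length : Int)
            - ((PySem.Set.ofList (pvCells tt day P)).length : Int)))).sum := by
      rw [PySem.List.foldl_add
          (g := fun row => 1000 * ((((PySem.List.sorted row (fun x => x) false).zip
              (PySem.List.slice (PySem.List.sorted row (fun x => x) false) (some 1) none)).map
              (fun p => if p.1 = p.2 then (1 : Int) else 0)).sum))]
      rw [if_pos hP, hrowcells, List.map_map, List.length_map]
      have hmap : (L.map ((fun row => 1000 * ((((PySem.List.sorted row (fun x => x) false).zip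
              (PySem.List.slice (PySem.List.sorted row (fun x => x) false) (some 1) none)).map
              (fun p => if p.1 = p.2 then (1 : Int) else 0)).sum)) ∘ (fun day => pvCells tt day P)))
          = L.map (fun day => 1000 * (((pvCells tt day P).length : Int)
              - ((PySem.Set.ofList (pvCells tt day P)).length : Int))) := by
        apply List.map_congr_left
        intro day _
        simp only [Function.comp]
        rw [pv_row_conflicts]
      rw [hmap, PySem.List.sum_map_add_int, PySem.List.sum_map_const_int]
      ring
    rw [hcost1, hflat]
    apply pv_check_congr
    intro t _
    rw [pv_load_count, hload0t t, zero_add]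
  · -- no periods: every day contributes nothing
    have hnil : PySem.List.pyRange 0 P 1 = [] := PySem.List.pyRange_one_eq_nil (by omega)
    have hrownil : rows = L.map (fun _ => ([] : List String)) := by
      rw [hrows, hnil]; rfl
    have hAfold : L.foldl (pvDayStepA tt P) (0, load0) = (0, load0) := by
      have : ∀ (acc : Int × PySem.Dict String Int) (day : Int), day ∈ L →
          pvDayStepA tt P acc day = acc := by
        intro acc day _
        unfold pvDayStepA
        rw [hnil]
        rfl
      rw [PySem.List.foldl_congr_mem _ _
          (fun (acc : Int × PySem.Dict String Int) (_ : Int) => acc) _ this,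
        PySem.List.foldl_ignore]
    rw [hAfold]
    have hcost1 : rows.foldl
        (fun c row =>
          c + 1000 * ((((PySem.List.sorted row (fun x => x) false).zip
              (PySem.List.slice (PySem.List.sorted row (fun x => x) false) (some 1) none)).map
              (fun p => if p.1 = p.2 then (1 : Int) else 0)).sum))
        (if 0 < P then 10 * (rows.length : Int) else 0) = 0 := by
      rw [if_neg hP, hrownil]
      have : ∀ (c : Int) (row : List String), row ∈ L.map (fun _ => ([] : List String)) →
          (c + 1000 * ((((PySem.List.sorted row (fun x => x) false).zip
              (PySem.List.slice (PySem.List.sorted row (fun x => x) false) (some 1) none)).map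
              (fun p => if p.1 = p.2 then (1 : Int) else 0)).sum)) = c := by
        intro c row hrow
        have : row = [] := by
          rcases List.mem_map.mp hrow with ⟨_, _, h⟩
          exact h.symm
        subst this
        simp only [show ((List.map (fun p => if p.1 = p.2 then (1 : Int) else 0)
            (((PySem.List.sorted ([] : List String) (fun x => x) false)).zip
              (PySem.List.slice (PySem.List.sorted ([] : List String) (fun x => x) false)
                (some 1) none))).sum) = 0 from rfl]
        ring
      rw [PySem.List.foldl_congr_mem _ _ (fun (c : Int) (_ : List String) => c) _ this,
        PySem.List.foldl_ignore]
    rw [hcost1]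
    have hflatnil : rows.flatMap (fun row => row) = [] := by
      rw [hrownil]
      simp
    rw [hflatnil]
    apply pv_check_congr
    intro t _
    simp [hload0t t]
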